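-- pv_equiv track=rewrite | github.com/xxOmen/atmforcv | app.py | prioritize_experience
-- ===== SOURCE A (Python) =====
-- def match_and_score_section(text, keywords):
--     text = text.lower()
--     return sum(1 for kw in keywords if kw in text)
--
-- def prioritize_experience(cv, keywords):
--     scored = []
--     for exp in cv.get("experience", []):
--         section_text = " ".join(exp.get("description", [])) if isinstance(exp.get("description"), list) else exp.get("description", "")
--         score = match_and_score_section(section_text, keywords)
--         scored.append((score, exp))
--     scored.sort(reverse=True, key=lambda x: x[0])
--     return [exp for score, exp in scored]
-- ===== SOURCE B (Python) =====
-- def prioritize_experience(cv, keywords):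
--     # counting sort by score (buckets filled in input order, emitted high-to-low)
--     experiences = cv.get("experience", [])
--     buckets = [[] for _ in range(len(keywords) + 1)]
--     for exp in experiences:
--         desc = exp.get("description")
--         text = " ".join(desc) if isinstance(desc, list) else (desc if desc is not None else "")
--         t = text.lower()
--         score = sum(kw in t for kw in keywords)
--         buckets[score].append(exp)
--     result = []
--     for bucket in reversed(buckets):
--         result.extend(bucket)
--     return result
-- ===== Notes on version B (the rewrite author's own statement) =====
-- stated objective: alternative
-- what changed: Replaces collect-pairs-then-stable-reverse-sort with a counting sort: experiences are appended in input order to score-indexed buckets, which are emitted from highest to lowest score.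
import Mathlib
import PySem

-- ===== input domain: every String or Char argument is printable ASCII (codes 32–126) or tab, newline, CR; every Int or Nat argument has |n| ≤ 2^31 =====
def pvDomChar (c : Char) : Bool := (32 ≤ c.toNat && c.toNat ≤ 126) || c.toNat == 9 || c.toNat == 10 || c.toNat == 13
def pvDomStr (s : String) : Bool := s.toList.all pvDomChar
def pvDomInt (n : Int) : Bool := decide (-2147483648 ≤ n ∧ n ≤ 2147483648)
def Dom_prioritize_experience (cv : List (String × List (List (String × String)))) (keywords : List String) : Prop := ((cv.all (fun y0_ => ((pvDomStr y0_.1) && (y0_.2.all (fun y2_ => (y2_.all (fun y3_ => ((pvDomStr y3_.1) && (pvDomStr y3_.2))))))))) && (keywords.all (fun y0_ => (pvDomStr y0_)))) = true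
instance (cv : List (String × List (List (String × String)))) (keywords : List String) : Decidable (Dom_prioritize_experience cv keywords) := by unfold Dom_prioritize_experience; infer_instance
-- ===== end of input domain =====

-- B replaces A's collect-then-stable-reverse-sort with a counting sort into score-indexed buckets (same results; no speed claim).


-- ===== PORT A =====
def match_and_score_section (text : String) (keywords : List String) : Int :=
  let t := PySem.Str.lower text
  keywords.foldl (fun acc kw => if PySem.Str.isIn kw t then acc + 1 else acc) 0

-- note: under the type convention exp's values are Strings, so Python's
-- 'isinstance(exp.get("description"), list)' branch is statically false and
-- 'exp.get("description", "")' is what remains.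
def prioritize_experience (cv : List (String × List (List (String × String)))) (keywords : List String) : List (List (String × String)) :=
  let exps := PySem.Dict.getD ⟨cv⟩ "experience" []
  let scored := exps.foldl (fun acc exp =>
      let section_text := PySem.Dict.getD ⟨exp⟩ "description" ""
      let score := match_and_score_section section_text keywords
      acc ++ [(score, exp)]) []
  (PySem.List.sorted scored (fun x => x.1) true).map (fun x => x.2)

-- ===== PORT B =====
def pvScoreB (exp : List (String × String)) (keywords : List String) : Nat :=
  let t := PySem.Str.lower (PySem.Dict.getD ⟨exp⟩ "description" "")
  keywords.countP (fun kw => PySem.Str.isIn kw t)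

def prioritize_experience_alt (cv : List (String × List (List (String × String)))) (keywords : List String) : List (List (String × String)) :=
  let exps := PySem.Dict.getD ⟨cv⟩ "experience" []
  let buckets := exps.foldl
      (fun (bs : List (List (List (String × String)))) exp =>
        let s := pvScoreB exp keywords
        bs.set s (bs.getD s [] ++ [exp]))
      (List.replicate (keywords.length + 1) [])
  buckets.reverse.foldl (fun acc b => acc ++ b) []

-- ===== PRECONDITION & SPEC =====
def Spec_prioritize_experience (cv : List (String × List (List (String × String)))) (keywords : List String) (out : List (List (String × String))) : Prop := out = prioritize_experience_alt cv keywords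
instance (cv : List (String × List (List (String × String)))) (keywords : List String) (out : List (List (String × String))) : Decidable (Spec_prioritize_experience cv keywords out) := by unfold Spec_prioritize_experience; infer_instance

-- ===== CLAIM (what is proved, stated in full; the proofs are below) =====
def Claim_equal_prioritize_experience : Prop := ∀ (cv : List (String × List (List (String × String)))) (keywords : List String), Dom_prioritize_experience cv keywords → Spec_prioritize_experience cv keywords (prioritize_experience cv keywords)

-- ===== LEMMAS AND PROOFS =====

-- insertBy passes over a prefix no element of which is 'before'
theorem pv_insertBy_append {α : Type} (before : α → α → Bool) (x : α) (hi lo : List α)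
    (h : ∀ y ∈ hi, before x y = false) :
    PySem.List.insertBy before x (hi ++ lo) = hi ++ PySem.List.insertBy before x lo := by
  induction hi with
  | nil => simp
  | cons y ys ih =>
    simp only [List.cons_append, PySem.List.insertBy]
    rw [h y (by simp)]
    simp [ih (fun z hz => h z (by simp [hz]))]

-- insertBy lands in front of a block every element of which is 'before'
theorem pv_insertBy_all_true {α : Type} (before : α → α → Bool) (x : α) (lo : List α)
    (h : ∀ y ∈ lo, before x y = true) :
    PySem.List.insertBy before x lo = x :: lo := by
  cases lo with
  | nil => rfl
  | cons y ys => simp [PySem.List.insertBy, h y (by simp)]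

-- inserting p into the bucketed concatenation (buckets listed by strictly descending key) appends p to its bucket
theorem pv_insertBy_buckets {E : Type} (vs : List Int) (hd : vs.Pairwise (· > ·))
    (ps : List (Int × E)) (p : Int × E) (hp : p.1 ∈ vs) :
    PySem.List.insertBy (fun a b => decide (b.1 < a.1)) p
      (vs.flatMap (fun s => ps.filter (fun q => q.1 == s)))
    = vs.flatMap (fun s => (ps ++ [p]).filter (fun q => q.1 == s)) := by
  induction vs with
  | nil => simp at hp
  | cons v vs' ih =>
    have hv : ∀ s ∈ vs', v > s := (List.pairwise_cons.mp hd).1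
    have hd' := (List.pairwise_cons.mp hd).2
    by_cases hpv : p.1 = v
    · -- p belongs to the head bucket
      have hfr : ∀ s ∈ vs', (ps ++ [p]).filter (fun q => q.1 == s) = ps.filter (fun q => q.1 == s) := by
        intro s hs
        have hne : p.1 ≠ s := by rw [hpv]; exact ne_of_gt (hv s hs)
        simp [List.filter_append, hne]
      simp only [List.flatMap_cons]
      rw [pv_insertBy_append _ _ _ _ (by
        intro y hy
        have := (List.mem_filter.mp hy).2
        have hy1 : y.1 = v := by simpa using this
        simp [hy1, hpv])]
      rw [pv_insertBy_all_true _ _ _ (by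
        intro y hy
        obtain ⟨l, hl, hyl⟩ := List.mem_flatMap.mp hy
        have hy1 : y.1 = l := by simpa using (List.mem_filter.mp hyl).2
        simp only [decide_eq_true_eq]; rw [hy1, hpv]; exact hv l hl)]
      have hhead : (ps ++ [p]).filter (fun q => q.1 == v) = ps.filter (fun q => q.1 == v) ++ [p] := by
        simp [List.filter_append, hpv]
      rw [hhead, List.flatMap_congr hfr]
      simp
    · -- p belongs to a later bucket
      have hp' : p.1 ∈ vs' := by cases List.mem_cons.mp hp with
        | inl h => exact absurd h hpv
        | inr h => exact h
      have hvp : p.1 < v := hv _ hp'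
      simp only [List.flatMap_cons]
      rw [pv_insertBy_append _ _ _ _ (by
        intro y hy
        have hy1 : y.1 = v := by simpa using (List.mem_filter.mp hy).2
        simp only [decide_eq_false_iff_not, not_lt]; rw [hy1]; exact le_of_lt hvp)]
      rw [ih hd' hp']
      have : (ps ++ [p]).filter (fun q => q.1 == v) = ps.filter (fun q => q.1 == v) := by
        have : (p.1 == v) = false := by simpa using hpv
        simp [List.filter_append, this]
      rw [this]

theorem pv_sorted_rev_buckets {E : Type} (vs : List Int) (hd : vs.Pairwise (· > ·))
    (ps : List (Int × E)) (hk : ∀ p ∈ ps, p.1 ∈ vs) :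
    PySem.List.sorted ps (fun x => x.1) true
    = vs.flatMap (fun s => ps.filter (fun q => q.1 == s)) := by
  rw [PySem.List.sorted_rev_eq_foldl_insertBy]
  induction ps using List.reverseRecOn with
  | nil => simp
  | append_singleton ps p ih =>
    rw [List.foldl_append]
    simp only [List.foldl_cons, List.foldl_nil]
    rw [ih (fun q hq => hk q (by simp [hq]))]
    exact pv_insertBy_buckets vs hd ps p (hk p (by simp))

theorem pv_set_map_range {α : Type} (m k : Nat) (f : Nat → α) (v : α) :
    ((List.range m).map f).set k v = (List.range m).map (fun s => if s = k then v else f s) := by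
  apply List.ext_getElem
  · simp
  · intro i h1 h2
    simp only [List.getElem_set, List.getElem_map, List.getElem_range] at *
    by_cases h : k = i
    · simp [h]
    · simp [h, Ne.symm h]

theorem pv_buckets_inv (keywords : List String) (exps : List (List (String × String))) :
    exps.foldl
      (fun (bs : List (List (List (String × String)))) exp =>
        bs.set (pvScoreB exp keywords) (bs.getD (pvScoreB exp keywords) [] ++ [exp]))
      (List.replicate (keywords.length + 1) [])
    = (List.range (keywords.length + 1)).map
        (fun s => exps.filter (fun e => pvScoreB e keywords == s)) := by
  induction exps using List.reverseRecOn with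
  | nil => simp [List.map_const']
  | append_singleton exps e ih =>
    rw [List.foldl_append, List.foldl_cons, List.foldl_nil, ih]
    have hs : pvScoreB e keywords < keywords.length + 1 := by
      have := List.countP_le_length (l := keywords) (p := fun kw => PySem.Str.isIn kw (PySem.Str.lower (PySem.Dict.getD ⟨e⟩ "description" "")))
      simp only [pvScoreB]; omega
    have hget : ((List.range (keywords.length + 1)).map
        (fun s => exps.filter (fun e => pvScoreB e keywords == s))).getD (pvScoreB e keywords) []
        = exps.filter (fun x => pvScoreB x keywords == pvScoreB e keywords) := by
      rw [List.getD_eq_getElem _ _ (by simpa using hs)]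
      simp
    rw [hget, pv_set_map_range _ _ _ _]
    apply List.map_congr_left
    intro s hs'
    by_cases h : s = pvScoreB e keywords
    · simp [h, List.filter_append]
    · have : (pvScoreB e keywords == s) = false := by simpa using fun hh => h hh.symm
      simp [h, List.filter_append, this]

-- A's per-experience score is B's Nat score, cast to Int
theorem pv_score_eq (exp : List (String × String)) (keywords : List String) :
    match_and_score_section (PySem.Dict.getD ⟨exp⟩ "description" "") keywords
    = (pvScoreB exp keywords : Int) := by
  simp [match_and_score_section, pvScoreB, PySem.List.foldl_if_add_one]

-- ===== VERDICT (by name: the statement is the Claim_ definition above) =====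
theorem prioritize_experience_spec : Claim_equal_prioritize_experience := by
  intro cv keywords _
  unfold Spec_prioritize_experience prioritize_experience prioritize_experience_alt
  dsimp only
  set exps := PySem.Dict.getD ⟨cv⟩ "experience" [] with hexps
  set n := keywords.length with hn
  -- A: scored list is a map
  rw [PySem.List.foldl_append_singleton_eq_map (f := fun exp =>
        (match_and_score_section (PySem.Dict.getD ⟨exp⟩ "description" "") keywords, exp))]
  simp only [List.nil_append]
  -- descending value list
  set vs : List Int := ((List.range (n + 1)).reverse.map (fun s : Nat => (s : Int))) with hvs
  have hdesc : vs.Pairwise (· > ·) := by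
    rw [hvs]
    apply List.Pairwise.map
    · intro a b h; exact_mod_cast h
    · rw [List.pairwise_reverse]; exact List.pairwise_lt_range
  have hmem : ∀ p ∈ exps.map (fun exp =>
      (match_and_score_section (PySem.Dict.getD ⟨exp⟩ "description" "") keywords, exp)), p.1 ∈ vs := by
    intro p hp
    obtain ⟨e, he, rfl⟩ := List.mem_map.mp hp
    rw [pv_score_eq, hvs]
    refine List.mem_map.mpr ⟨pvScoreB e keywords, ?_, rfl⟩
    rw [List.mem_reverse, List.mem_range]
    have := List.countP_le_length (l := keywords) (p := fun kw => PySem.Str.isIn kw (PySem.Str.lower (PySem.Dict.getD ⟨e⟩ "description" "")))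
    simp only [pvScoreB]; omega
  rw [pv_sorted_rev_buckets vs hdesc _ hmem]
  -- B side
  rw [pv_buckets_inv keywords exps]
  rw [PySem.List.foldl_append_eq_flatten, List.nil_append, ← List.map_reverse, ← List.flatMap_def]
  rw [List.map_flatMap, hvs, List.flatMap_map]
  apply List.flatMap_congr
  intro s hs
  rw [List.filter_map, List.map_map]
  have hpred : ((fun (q : Int × List (String × String)) => q.1 == (s : Int)) ∘
      (fun exp => (match_and_score_section (PySem.Dict.getD ⟨exp⟩ "description" "") keywords, exp)))
      = fun e => pvScoreB e keywords == s := by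
    funext e
    simp [pv_score_eq]
  rw [hpred]
  have hid : ((fun (x : Int × List (String × String)) => x.2) ∘
      (fun exp => (match_and_score_section (PySem.Dict.getD ⟨exp⟩ "description" "") keywords, exp))) = id := rfl
  rw [hid, List.map_id]
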